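-- pv_equiv track=rewrite | github.com/TheAlgorithms/Python | maths/reverse_number_pattern.py | reverse_number_pattern
-- ===== SOURCE A (Python) =====
-- from typing import List
--
-- def reverse_number_pattern(n: int) -> List[str]:
--     """
--     Returns a reverse number pattern.
--
--     >>> reverse_number_pattern(3)
--     ['123', '12', '1']
--     >>> reverse_number_pattern(1)
--     ['1']
--     >>> reverse_number_pattern(0)
--     []
--     """
--     if n <= 0:
--         return []
--
--     result = []
--     for i in range(n, 0, -1):
--         line = ""
--         for x in range(1, i + 1):
--             line += str(x)
--         result.append(line)
--     return result
-- ===== SOURCE B (Python) =====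
-- def reverse_number_pattern(n: int) -> list:
--     if n <= 0:
--         return []
--     rows = []
--     prefix = ""
--     for i in range(1, n + 1):
--         prefix += str(i)
--         rows.append(prefix)
--     rows.reverse()
--     return rows
-- ===== Notes on version B (the rewrite author's own statement) =====
-- stated objective: faster
-- what changed: B builds the rows bottom-up in one pass with a growing prefix string and reverses the list at the end, instead of A's nested loop that rebuilds every line from scratch.
import Mathlib
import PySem

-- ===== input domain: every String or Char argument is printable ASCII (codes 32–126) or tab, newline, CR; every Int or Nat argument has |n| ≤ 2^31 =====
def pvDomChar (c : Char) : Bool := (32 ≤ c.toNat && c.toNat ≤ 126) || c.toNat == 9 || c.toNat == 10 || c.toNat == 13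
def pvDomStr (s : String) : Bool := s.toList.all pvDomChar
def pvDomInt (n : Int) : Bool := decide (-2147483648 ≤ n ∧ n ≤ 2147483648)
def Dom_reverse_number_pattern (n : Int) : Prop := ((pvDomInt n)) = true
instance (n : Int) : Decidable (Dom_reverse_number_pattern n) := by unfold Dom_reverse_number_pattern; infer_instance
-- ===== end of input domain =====

-- B builds the rows in one bottom-up pass with a growing prefix (then reverses), instead of A's nested loop rebuilding each line.

-- ===== PORT A =====
def reverse_number_pattern (n : Int) : List String :=
  if n ≤ 0 then []
  else
    (PySem.List.pyRange n 0 (-1)).foldl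
      (fun result i =>
        result ++ [(PySem.List.pyRange 1 (i + 1) 1).foldl
          (fun line x => line ++ PySem.Int.toStr x) ""])
      []

-- ===== PORT B =====
def reverse_number_pattern_alt (n : Int) : List String :=
  if n ≤ 0 then []
  else
    ((PySem.List.pyRange 1 (n + 1) 1).foldl
      (fun (st : String × List String) i =>
        let pfx := st.1 ++ PySem.Int.toStr i
        (pfx, st.2 ++ [pfx]))
      ("", [])).2.reverse

-- ===== PRECONDITION & SPEC =====
def Spec_reverse_number_pattern (n : Int) (out : List String) : Prop := out = reverse_number_pattern_alt n
instance (n : Int) (out : List String) : Decidable (Spec_reverse_number_pattern n out) := by unfold Spec_reverse_number_pattern; infer_instance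

-- ===== CLAIM (what is proved, stated in full; the proofs are below) =====
def Claim_equal_reverse_number_pattern : Prop := ∀ (n : Int), Dom_reverse_number_pattern n → Spec_reverse_number_pattern n (reverse_number_pattern n)

-- ===== LEMMAS AND PROOFS =====

-- the line with digits 1..i, as A's inner loop computes it
def pvLine (i : Int) : String :=
  (PySem.List.pyRange 1 (i + 1) 1).foldl (fun line x => line ++ PySem.Int.toStr x) ""

lemma pvLine_succ (k : Nat) :
    pvLine ((k : Int) + 1) = pvLine (k : Int) ++ PySem.Int.toStr ((k : Int) + 1) := by
  unfold pvLine
  rw [show ((k : Int) + 1 + 1) = ((k : Int) + 1) + 1 from rfl,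
      PySem.List.pyRange_one_succ_right (by omega), List.foldl_append]
  rfl

lemma pvB_fold (k : Nat) :
    (PySem.List.pyRange 1 ((k : Int) + 1) 1).foldl
      (fun (st : String × List String) i =>
        let pfx := st.1 ++ PySem.Int.toStr i
        (pfx, st.2 ++ [pfx]))
      ("", []) =
    (pvLine (k : Int), (PySem.List.pyRange 1 ((k : Int) + 1) 1).map pvLine) := by
  induction k with
  | zero =>
      rw [PySem.List.pyRange_one_eq_nil (by omega)]
      simp [pvLine]
  | succ m ih =>
      have h : ((m + 1 : Nat) : Int) + 1 = ((m : Int) + 1) + 1 := by push_cast; ring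
      rw [h, PySem.List.pyRange_one_succ_right (by omega), List.foldl_append,
          List.map_append, ih]
      simp [pvLine_succ m]

lemma pvA_eq_map (n : Int) :
    (PySem.List.pyRange n 0 (-1)).foldl
      (fun result i =>
        result ++ [(PySem.List.pyRange 1 (i + 1) 1).foldl
          (fun line x => line ++ PySem.Int.toStr x) ""])
      [] = (PySem.List.pyRange n 0 (-1)).map pvLine := by
  exact PySem.List.foldl_append_singleton_eq_map pvLine (PySem.List.pyRange n 0 (-1)) []

-- ===== VERDICT (by name: the statement is the Claim_ definition above) =====
theorem reverse_number_pattern_spec : Claim_equal_reverse_number_pattern := by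
  intro n _
  unfold Spec_reverse_number_pattern reverse_number_pattern reverse_number_pattern_alt
  by_cases h : n ≤ 0
  · simp [h]
  · simp only [h, if_false]
    obtain ⟨k, hk⟩ : ∃ k : Nat, n = (k : Int) := ⟨n.toNat, by omega⟩
    subst hk
    rw [pvA_eq_map, pvB_fold k, PySem.List.pyRange_neg_one_eq_reverse]
    simp
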